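-- pv_equiv track=rewrite | github.com/kennethjang34/epi | epi_judge_python/is_string_in_matrix.py | is_pattern_contained_in_grid
-- ===== SOURCE A (Python) =====
-- from typing import List, Set
--
-- def is_pattern_contained_in_grid(grid: List[List[int]], pattern: List[int]) -> bool:
--     table = [
--         [[None] * (len(grid[0])) for _ in range(len(grid))]
--         for _ in range(len(pattern) + 1)
--     ]
--
--     def helper(
--         grid,
--         pattern,
--         i,
--         j,
--         table,
--     ):
--         ans = False
--         if len(pattern) == 0:
--             return True
--         if i < 0 or j < 0 or i >= len(grid) or j >= len(grid[0]):
--             return False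
--         if table[len(pattern)][i][j] is not None:
--             return table[len(pattern)][i][j]
--         elif grid[i][j] == pattern[0]:
--             sub_pattern = pattern[1:]
--             ans = (
--                 helper(grid, sub_pattern, i + 1, j, table)
--                 or helper(grid, sub_pattern, i - 1, j, table)
--                 or helper(grid, sub_pattern, i, j + 1, table)
--                 or helper(grid, sub_pattern, i, j - 1, table)
--             )
--         table[len(pattern)][i][j] = ans
--         return ans
--
--     for i in range(len(grid)):
--         for j in range(len(grid[0])):
--             if helper(grid, pattern, i, j, table):
--                 return True
--     return False
-- ===== SOURCE B (Python) =====
-- def is_pattern_contained_in_grid(grid, pattern):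
--     cols = len(grid[0]) if grid else 0
--     rows = len(grid)
--     if not pattern:
--         return rows > 0 and cols > 0
--     # frontier = cells from which the current suffix of pattern can be matched
--     frontier = {(i, j) for i in range(rows) for j in range(cols)
--                 if grid[i][j] == pattern[-1]}
--     for p in reversed(pattern[:-1]):
--         frontier = {(i, j) for i in range(rows) for j in range(cols)
--                     if grid[i][j] == p
--                     and ((i + 1, j) in frontier or (i - 1, j) in frontier
--                          or (i, j + 1) in frontier or (i, j - 1) in frontier)}
--     return len(frontier) > 0
-- ===== Notes on version B (the rewrite author's own statement) =====
-- stated objective: alternative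
-- what changed: Replaces A's memoized 4-way recursive DFS (helper plus a len(pattern)-by-rows-by-cols memo table, scanned from every start cell) by an iterative bottom-up dynamic program: a reachability frontier of cells, computed backwards over the pattern suffixes, returning whether the final frontier is nonempty.
-- outside the precondition, e.g. on is_pattern_contained_in_grid([[1, 2], [3]], [1]): A returns True, B raises IndexError; on is_pattern_contained_in_grid([[1, 1], [1]], []): A returns True, B returns True
import Mathlib
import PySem

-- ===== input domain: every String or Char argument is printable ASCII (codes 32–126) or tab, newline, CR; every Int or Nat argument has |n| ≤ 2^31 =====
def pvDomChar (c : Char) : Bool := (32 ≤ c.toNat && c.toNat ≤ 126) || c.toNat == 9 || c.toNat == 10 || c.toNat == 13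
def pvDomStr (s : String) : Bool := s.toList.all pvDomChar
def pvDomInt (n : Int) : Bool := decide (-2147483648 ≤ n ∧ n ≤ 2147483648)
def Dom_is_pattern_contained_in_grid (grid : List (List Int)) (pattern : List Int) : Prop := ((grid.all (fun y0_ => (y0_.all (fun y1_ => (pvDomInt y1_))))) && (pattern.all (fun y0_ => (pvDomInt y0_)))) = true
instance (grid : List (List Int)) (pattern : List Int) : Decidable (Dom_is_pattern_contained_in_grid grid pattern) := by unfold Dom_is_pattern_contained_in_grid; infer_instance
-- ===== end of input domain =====

-- B replaces A's memoized 4-way recursive search by an iterative reachability frontier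
-- computed backwards over the pattern (objective: alternative decomposition, same asymptotic cost).


-- ===== PORT A =====
-- grid[i][j]; under Pre_ every access made by either program is in bounds, so the defaults are never read
def pvCell (grid : List (List Int)) (i j : Int) : Int :=
  PySem.List.pyGetD (PySem.List.pyGetD grid i []) j 0

-- A's `helper`, with the memo table (Python's list-of-lists of None, indexed by
-- [len(pattern)][i][j]) modelled as a Dict keyed by (len(pattern), i, j); absent = None.
-- `or` short-circuits exactly as in Python; the table is threaded through the calls.
def pvHelperA (grid : List (List Int)) (rows cols : Int) :
    List Int → Int → Int → PySem.Dict (Nat × Int × Int) Bool →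
      Bool × PySem.Dict (Nat × Int × Int) Bool
  | [], _, _, table => (true, table)
  | p :: ps, i, j, table =>
    if i < 0 || j < 0 || rows ≤ i || cols ≤ j then (false, table)
    else
      match table.get? (ps.length + 1, i, j) with
      | some b => (b, table)
      | none =>
        if pvCell grid i j == p then
          let r1 := pvHelperA grid rows cols ps (i + 1) j table
          if r1.1 then (true, r1.2.insert (ps.length + 1, i, j) true)
          else
            let r2 := pvHelperA grid rows cols ps (i - 1) j r1.2
            if r2.1 then (true, r2.2.insert (ps.length + 1, i, j) true)
            else
              let r3 := pvHelperA grid rows cols ps i (j + 1) r2.2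
              if r3.1 then (true, r3.2.insert (ps.length + 1, i, j) true)
              else
                let r4 := pvHelperA grid rows cols ps i (j - 1) r3.2
                (r4.1, r4.2.insert (ps.length + 1, i, j) r4.1)
        else (false, table.insert (ps.length + 1, i, j) false)

-- the double for-loop with early `return True`, flattened over the (i, j) pairs in loop order
def pvScanA (grid : List (List Int)) (pattern : List Int) (rows cols : Int) :
    List (Int × Int) → PySem.Dict (Nat × Int × Int) Bool → Bool
  | [], _ => false
  | (i, j) :: rest, table =>
    let r := pvHelperA grid rows cols pattern i j table
    if r.1 then true else pvScanA grid pattern rows cols rest r.2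

def is_pattern_contained_in_grid (grid : List (List Int)) (pattern : List Int) : Bool :=
  let rows : Int := grid.length
  let cols : Int := (grid.headI).length   -- len(grid[0]) (A only evaluates it when grid is nonempty)
  pvScanA grid pattern rows cols
    ((PySem.List.pyRange 0 rows 1).flatMap fun i =>
      (PySem.List.pyRange 0 cols 1).map fun j => (i, j))
    PySem.Dict.empty

-- ===== PORT B =====
-- {(i, j) for i in range(rows) for j in range(cols) if grid[i][j] == p}  (the initial frontier)
def pvInitB (grid : List (List Int)) (rows cols : Int) (p : Int) : PySem.Set (Int × Int) :=
  PySem.Set.ofList ((PySem.List.pyRange 0 rows 1).flatMap fun i =>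
    (PySem.List.pyRange 0 cols 1).filterMap fun j =>
      if pvCell grid i j == p then some (i, j) else none)

-- one step of the frontier loop: cells matching p with a 4-neighbour in the old frontier
def pvStepB (grid : List (List Int)) (rows cols : Int)
    (f : PySem.Set (Int × Int)) (p : Int) : PySem.Set (Int × Int) :=
  PySem.Set.ofList ((PySem.List.pyRange 0 rows 1).flatMap fun i =>
    (PySem.List.pyRange 0 cols 1).filterMap fun j =>
      if pvCell grid i j == p &&
          (PySem.Set.contains f (i + 1, j) || PySem.Set.contains f (i - 1, j) ||
           PySem.Set.contains f (i, j + 1) || PySem.Set.contains f (i, j - 1))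
      then some (i, j) else none)
-- the frontier of B for the nonempty pattern p :: ps (proof-side name for B's fold)

def is_pattern_contained_in_grid_alt (grid : List (List Int)) (pattern : List Int) : Bool :=
  let cols : Int := (grid.headI).length   -- len(grid[0]) if grid else 0
  let rows : Int := grid.length
  match pattern with
  | [] => decide ((0 : Int) < rows) && decide ((0 : Int) < cols)
  | _ :: _ =>
    let f0 := pvInitB grid rows cols (PySem.List.pyGetD pattern (-1) 0)
    let ff := ((PySem.List.slice pattern none (some (-1))).reverse).foldl
                (pvStepB grid rows cols) f0
    decide (0 < PySem.Set.len ff)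

-- ===== PRECONDITION & SPEC =====
-- Pre_ excludes ragged grids with a row shorter than the first row: there A raises IndexError or
-- returns early depending on the search order, an accident B (which scans all cells) cannot share.
def Pre_is_pattern_contained_in_grid (grid : List (List Int)) (pattern : List Int) : Prop :=
  ∀ row ∈ grid, (grid.headI).length ≤ row.length

instance (grid : List (List Int)) (pattern : List Int) : Decidable (Pre_is_pattern_contained_in_grid grid pattern) := by unfold Pre_is_pattern_contained_in_grid; infer_instance

def pvWitness_is_pattern_contained_in_grid : List (List Int) × List Int :=
  ([[1, 2], [3, 4]], [1, 2])

def Spec_is_pattern_contained_in_grid (grid : List (List Int)) (pattern : List Int) (out : Bool) : Prop := out = is_pattern_contained_in_grid_alt grid pattern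
instance (grid : List (List Int)) (pattern : List Int) (out : Bool) : Decidable (Spec_is_pattern_contained_in_grid grid pattern out) := by unfold Spec_is_pattern_contained_in_grid; infer_instance

-- ===== CLAIM (what is proved, stated in full; the proofs are below) =====
def Claim_equal_is_pattern_contained_in_grid : Prop := ∀ (grid : List (List Int)) (pattern : List Int), Dom_is_pattern_contained_in_grid grid pattern → Pre_is_pattern_contained_in_grid grid pattern → Spec_is_pattern_contained_in_grid grid pattern (is_pattern_contained_in_grid grid pattern)

-- ===== LEMMAS AND PROOFS =====

-- the purely functional meaning of A's memoized helper: does `pat` match starting at (i, j)?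
def pvMatch (grid : List (List Int)) (rows cols : Int) : List Int → Int → Int → Bool
  | [], _, _ => true
  | p :: ps, i, j =>
    if i < 0 || j < 0 || rows ≤ i || cols ≤ j then false
    else pvCell grid i j == p &&
      (pvMatch grid rows cols ps (i + 1) j || pvMatch grid rows cols ps (i - 1) j ||
       pvMatch grid rows cols ps i (j + 1) || pvMatch grid rows cols ps i (j - 1))

def pvGood (grid : List (List Int)) (rows cols : Int) (pat0 : List Int)
    (t : PySem.Dict (Nat × Int × Int) Bool) : Prop :=
  ∀ n i j b, t.get? (n, i, j) = some b →
    b = pvMatch grid rows cols (pat0.drop (pat0.length - n)) i j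

lemma pvSuffix_drop {s pat0 : List Int} (h : s <:+ pat0) :
    pat0.drop (pat0.length - s.length) = s := by
  obtain ⟨t, rfl⟩ := h
  simp

lemma pvGood_insert {grid : List (List Int)} {rows cols : Int} {pat0 : List Int}
    {t : PySem.Dict (Nat × Int × Int) Bool} (ht : pvGood grid rows cols pat0 t)
    {s : List Int} (h : s <:+ pat0) (i j : Int) {v : Bool}
    (hv : v = pvMatch grid rows cols s i j) :
    pvGood grid rows cols pat0 (t.insert (s.length, i, j) v) := by
  intro n i' j' b hb
  rw [PySem.Dict.get?_insert] at hb
  split at hb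
  · rename_i heq
    simp only [Prod.mk.injEq] at heq
    obtain ⟨rfl, rfl, rfl⟩ := heq
    cases hb
    rw [pvSuffix_drop h]
    exact hv
  · exact ht _ _ _ _ hb

lemma pvHelperA_spec (grid : List (List Int)) (rows cols : Int) (pat0 : List Int) :
    ∀ (s : List Int), s <:+ pat0 → ∀ (i j : Int) (t : PySem.Dict (Nat × Int × Int) Bool),
      pvGood grid rows cols pat0 t →
      (pvHelperA grid rows cols s i j t).1 = pvMatch grid rows cols s i j ∧
      pvGood grid rows cols pat0 (pvHelperA grid rows cols s i j t).2 := by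
  intro s
  induction s with
  | nil => intro _ i j t ht; exact ⟨rfl, ht⟩
  | cons p ps IH =>
    intro h i j t ht
    have hps : ps <:+ pat0 := (List.suffix_cons p ps).trans h
    by_cases hb : (i < 0 || j < 0 || rows ≤ i || cols ≤ j) = true
    · refine ⟨?_, ?_⟩
      · simp only [pvHelperA, pvMatch, hb, if_true]
      · simp only [pvHelperA, hb, if_true]; exact ht
    · rw [Bool.not_eq_true] at hb
      cases hget : t.get? (ps.length + 1, i, j) with
      | some b =>
        have hbv : b = pvMatch grid rows cols (p :: ps) i j := by
          have := ht _ _ _ _ hget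
          rwa [show ps.length + 1 = (p :: ps).length from rfl, pvSuffix_drop h] at this
        refine ⟨?_, ?_⟩
        · simp only [pvHelperA, hb, Bool.false_eq_true, if_false, hget, hbv]
        · simp only [pvHelperA, hb, Bool.false_eq_true, if_false, hget]; exact ht
      | none =>
        by_cases hc : (pvCell grid i j == p) = true
        · obtain ⟨e1, g1⟩ := IH hps (i + 1) j t ht
          obtain ⟨e2, g2⟩ := IH hps (i - 1) j _ g1
          obtain ⟨e3, g3⟩ := IH hps i (j + 1) _ g2
          obtain ⟨e4, g4⟩ := IH hps i (j - 1) _ g3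
          have hm : pvMatch grid rows cols (p :: ps) i j =
              (pvMatch grid rows cols ps (i + 1) j || pvMatch grid rows cols ps (i - 1) j ||
               pvMatch grid rows cols ps i (j + 1) || pvMatch grid rows cols ps i (j - 1)) := by
            simp [pvMatch, hb, hc]
          by_cases h1 : (pvHelperA grid rows cols ps (i + 1) j t).1 = true
          · have hv : pvMatch grid rows cols (p :: ps) i j = true := by
              rw [hm, ← e1, h1]; simp
            refine ⟨?_, ?_⟩
            · simp only [pvHelperA, hb, Bool.false_eq_true, if_false, hget, hc, if_true, h1, hv]
            · simp only [pvHelperA, hb, Bool.false_eq_true, if_false, hget, hc, if_true, h1]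
              exact pvGood_insert g1 h i j hv.symm
          · rw [Bool.not_eq_true] at h1
            by_cases h2 : (pvHelperA grid rows cols ps (i - 1) j (pvHelperA grid rows cols ps (i + 1) j t).2).1 = true
            · have hv : pvMatch grid rows cols (p :: ps) i j = true := by
                rw [hm, ← e2, h2]; simp
              refine ⟨?_, ?_⟩
              · simp only [pvHelperA, hb, Bool.false_eq_true, if_false, hget, hc, if_true, h1, h2, hv]
              · simp only [pvHelperA, hb, Bool.false_eq_true, if_false, hget, hc, if_true, h1, h2]
                exact pvGood_insert g2 h i j hv.symm
            · rw [Bool.not_eq_true] at h2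
              by_cases h3 : (pvHelperA grid rows cols ps i (j + 1) (pvHelperA grid rows cols ps (i - 1) j (pvHelperA grid rows cols ps (i + 1) j t).2).2).1 = true
              · have hv : pvMatch grid rows cols (p :: ps) i j = true := by
                  rw [hm, ← e3, h3]; simp
                refine ⟨?_, ?_⟩
                · simp only [pvHelperA, hb, Bool.false_eq_true, if_false, hget, hc, if_true, h1, h2, h3, hv]
                · simp only [pvHelperA, hb, Bool.false_eq_true, if_false, hget, hc, if_true, h1, h2, h3]
                  exact pvGood_insert g3 h i j hv.symm
              · rw [Bool.not_eq_true] at h3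
                have hv : pvMatch grid rows cols (p :: ps) i j =
                    (pvHelperA grid rows cols ps i (j - 1) (pvHelperA grid rows cols ps i (j + 1) (pvHelperA grid rows cols ps (i - 1) j (pvHelperA grid rows cols ps (i + 1) j t).2).2).2).1 := by
                  rw [hm, ← e1, ← e2, ← e3, ← e4, h1, h2, h3]; simp
                refine ⟨?_, ?_⟩
                · simp only [pvHelperA, hb, Bool.false_eq_true, if_false, hget, hc, if_true, h1, h2, h3]
                  exact hv.symm
                · simp only [pvHelperA, hb, Bool.false_eq_true, if_false, hget, hc, if_true, h1, h2, h3]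
                  exact pvGood_insert g4 h i j hv.symm
        · rw [Bool.not_eq_true] at hc
          have hv : pvMatch grid rows cols (p :: ps) i j = false := by
            simp [pvMatch, hb, hc]
          refine ⟨?_, ?_⟩
          · simp only [pvHelperA, hb, Bool.false_eq_true, if_false, hget, hc]
            exact hv.symm
          · simp only [pvHelperA, hb, Bool.false_eq_true, if_false, hget, hc]
            exact pvGood_insert ht h i j hv.symm

lemma pvGoodE (g : List (List Int)) (r c : Int) (p : List Int) : pvGood g r c p PySem.Dict.empty := by
  intro n i j b hb
  rw [PySem.Dict.get?_empty] at hb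
  cases hb

lemma pvScanA_spec (grid : List (List Int)) (pattern : List Int) (rows cols : Int) :
    ∀ (cells : List (Int × Int)) (t : PySem.Dict (Nat × Int × Int) Bool),
      pvGood grid rows cols pattern t →
      pvScanA grid pattern rows cols cells t
        = cells.any (fun c => pvMatch grid rows cols pattern c.1 c.2) := by
  intro cells
  induction cells with
  | nil => intro t _; simp [pvScanA]
  | cons c rest IH =>
    obtain ⟨i, j⟩ := c
    intro t ht
    obtain ⟨e, g⟩ := pvHelperA_spec grid rows cols pattern pattern (List.suffix_refl _) i j t ht
    by_cases h1 : (pvHelperA grid rows cols pattern i j t).1 = true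
    · have : pvMatch grid rows cols pattern i j = true := by rw [← e, h1]
      simp [pvScanA, h1, this]
    · rw [Bool.not_eq_true] at h1
      have hm : pvMatch grid rows cols pattern i j = false := by rw [← e, h1]
      simp [pvScanA, h1, hm, IH _ g]

lemma pvMatch_cons_iff (grid : List (List Int)) (rows cols : Int) (p : Int) (ps : List Int)
    (i j : Int) :
    pvMatch grid rows cols (p :: ps) i j = true ↔
      ((0 ≤ i ∧ i < rows) ∧ (0 ≤ j ∧ j < cols) ∧ pvCell grid i j = p ∧
        (pvMatch grid rows cols ps (i + 1) j = true ∨ pvMatch grid rows cols ps (i - 1) j = true ∨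
         pvMatch grid rows cols ps i (j + 1) = true ∨ pvMatch grid rows cols ps i (j - 1) = true)) := by
  simp only [pvMatch]
  split_ifs with h
  · simp only [Bool.or_eq_true, decide_eq_true_eq] at h
    constructor
    · intro hx; cases hx
    · rintro ⟨h1, h2, h3, -⟩; exact absurd h (by omega)
  · simp only [Bool.or_eq_true, decide_eq_true_eq, not_or, not_lt, not_le] at h
    simp only [Bool.and_eq_true, Bool.or_eq_true, beq_iff_eq]
    constructor
    · rintro ⟨hc, hm⟩
      refine ⟨⟨by omega, by omega⟩, ⟨by omega, by omega⟩, hc, by tauto⟩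
    · rintro ⟨-, -, hc, hm⟩
      exact ⟨hc, by tauto⟩

lemma pvMem_pvInitB (grid : List (List Int)) (rows cols : Int) (p : Int) (i j : Int) :
    ((i, j) ∈ pvInitB grid rows cols p) ↔
      ((0 ≤ i ∧ i < rows) ∧ (0 ≤ j ∧ j < cols) ∧ pvCell grid i j = p) := by
  simp only [pvInitB, PySem.Set.mem_ofList, List.mem_flatMap, List.mem_filterMap,
    PySem.List.mem_pyRange_one]
  constructor
  · rintro ⟨i', hi, j', hj, hif⟩
    split_ifs at hif with hc
    · obtain ⟨rfl, rfl⟩ : i' = i ∧ j' = j := by simpa using hif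
      exact ⟨hi, hj, by simpa using hc⟩
  · rintro ⟨hi, hj, hc⟩
    exact ⟨i, hi, j, hj, by simp [hc]⟩

lemma pvMem_pvStepB (grid : List (List Int)) (rows cols : Int)
    (f : PySem.Set (Int × Int)) (p : Int) (i j : Int) :
    ((i, j) ∈ pvStepB grid rows cols f p) ↔
      ((0 ≤ i ∧ i < rows) ∧ (0 ≤ j ∧ j < cols) ∧ pvCell grid i j = p ∧
        ((i + 1, j) ∈ f ∨ (i - 1, j) ∈ f ∨ (i, j + 1) ∈ f ∨ (i, j - 1) ∈ f)) := by
  simp only [pvStepB, PySem.Set.mem_ofList, List.mem_flatMap, List.mem_filterMap,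
    PySem.List.mem_pyRange_one]
  constructor
  · rintro ⟨i', hi, j', hj, hif⟩
    split_ifs at hif with hc
    · obtain ⟨rfl, rfl⟩ : i' = i ∧ j' = j := by simpa using hif
      simp only [Bool.and_eq_true, Bool.or_eq_true, beq_iff_eq, PySem.Set.contains_iff] at hc
      exact ⟨hi, hj, hc.1, by tauto⟩
  · rintro ⟨hi, hj, hc, hnb⟩
    refine ⟨i, hi, j, hj, ?_⟩
    have : (pvCell grid i j == p &&
        (PySem.Set.contains f (i + 1, j) || PySem.Set.contains f (i - 1, j) ||
         PySem.Set.contains f (i, j + 1) || PySem.Set.contains f (i, j - 1))) = true := by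
      simp only [Bool.and_eq_true, Bool.or_eq_true, beq_iff_eq, PySem.Set.contains_iff]
      exact ⟨hc, by tauto⟩
    rw [if_pos this]

def pvF (grid : List (List Int)) (rows cols : Int) (p : Int) (ps : List Int) :
    PySem.Set (Int × Int) :=
  (((p :: ps).dropLast).reverse).foldl (pvStepB grid rows cols)
    (pvInitB grid rows cols ((p :: ps).getLast (by simp)))

lemma pvF_mem (grid : List (List Int)) (rows cols : Int) :
    ∀ (ps : List Int) (p : Int) (i j : Int),
      ((i, j) ∈ pvF grid rows cols p ps) ↔ pvMatch grid rows cols (p :: ps) i j = true := by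
  intro ps
  induction ps with
  | nil =>
    intro p i j
    have : pvF grid rows cols p [] = pvInitB grid rows cols p := by simp [pvF]
    rw [this, pvMem_pvInitB, pvMatch_cons_iff]
    simp [pvMatch]
  | cons q qs IH =>
    intro p i j
    have hstep : pvF grid rows cols p (q :: qs)
        = pvStepB grid rows cols (pvF grid rows cols q qs) p := by
      simp [pvF, List.foldl_append]
    rw [hstep, pvMem_pvStepB, pvMatch_cons_iff]
    simp only [IH]

lemma pvPyGetD_neg_one (xs : List Int) (h : xs ≠ []) (d : Int) :
    PySem.List.pyGetD xs (-1) d = xs.getLast h := by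
  have hl : 0 < xs.length := List.length_pos_iff.mpr h
  simp only [PySem.List.pyGetD, PySem.List.pyGet?, PySem.List.pyIdx?]
  rw [if_neg (by omega), if_pos (by omega)]
  have hk : xs.length - (-(-1 : Int)).toNat = xs.length - 1 := by omega
  rw [hk]
  simp [Option.bind]
  rw [List.getElem?_eq_getElem (by omega : xs.length - 1 < xs.length)]
  simp [List.getLast_eq_getElem]

lemma pvMain (grid : List (List Int)) (pattern : List Int) :
    is_pattern_contained_in_grid grid pattern = is_pattern_contained_in_grid_alt grid pattern := by
  have hA : is_pattern_contained_in_grid grid pattern =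
      (((PySem.List.pyRange 0 (grid.length : Int) 1).flatMap fun i =>
        (PySem.List.pyRange 0 ((grid.headI).length : Int) 1).map fun j => (i, j)).any
          fun c => pvMatch grid (grid.length : Int) ((grid.headI).length : Int) pattern c.1 c.2) := by
    unfold is_pattern_contained_in_grid
    exact pvScanA_spec _ _ _ _ _ _ (pvGoodE _ _ _ _)
  rw [hA]
  cases pattern with
  | nil =>
    show _ = (decide ((0 : Int) < (grid.length : Int)) && decide ((0 : Int) < ((grid.headI).length : Int)))
    rw [Bool.eq_iff_iff]
    simp only [List.any_eq_true, List.mem_flatMap, List.mem_map, PySem.List.mem_pyRange_one,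
      Bool.and_eq_true, decide_eq_true_eq, pvMatch]
    constructor
    · rintro ⟨c, ⟨i, hi, j, hj, rfl⟩, -⟩
      exact ⟨by omega, by omega⟩
    · rintro ⟨hr, hc⟩
      exact ⟨(0, 0), ⟨0, ⟨le_refl 0, hr⟩, 0, ⟨le_refl 0, hc⟩, rfl⟩, trivial⟩
  | cons p ps =>
    have halt : is_pattern_contained_in_grid_alt grid (p :: ps)
        = decide (0 < PySem.Set.len (pvF grid (grid.length : Int) ((grid.headI).length : Int) p ps)) := by
      show decide (0 < PySem.Set.len _) = _
      rw [PySem.List.slice_to_neg_one, pvPyGetD_neg_one (p :: ps) (by simp) 0]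
      rfl
    rw [halt, Bool.eq_iff_iff]
    simp only [List.any_eq_true, List.mem_flatMap, List.mem_map, PySem.List.mem_pyRange_one,
      decide_eq_true_eq]
    constructor
    · rintro ⟨c, ⟨i, hi, j, hj, rfl⟩, hmp⟩
      have hmem := (pvF_mem grid _ _ ps p i j).mpr hmp
      have hpos := List.length_pos_iff.mpr (List.ne_nil_of_mem hmem)
      simp only [PySem.Set.len]
      exact_mod_cast hpos
    · intro hlen
      have hpos : 0 < (pvF grid (grid.length : Int) ((grid.headI).length : Int) p ps).length := by
        simp only [PySem.Set.len] at hlen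
        exact_mod_cast hlen
      obtain ⟨⟨i, j⟩, hmem⟩ := List.exists_mem_of_length_pos hpos
      have hmp := (pvF_mem grid _ _ ps p i j).mp hmem
      obtain ⟨hi, hj, -⟩ := (pvMatch_cons_iff _ _ _ _ _ _ _).mp hmp
      exact ⟨(i, j), ⟨i, hi, j, hj, rfl⟩, hmp⟩

-- ===== VERDICT (by name: the statement is the Claim_ definition above) =====
theorem is_pattern_contained_in_grid_spec : Claim_equal_is_pattern_contained_in_grid := by
  intro grid pattern _ _
  unfold Spec_is_pattern_contained_in_grid
  exact pvMain grid pattern
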